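-- pv_equiv track=rewrite | github.com/CommonerCoffee/nycmelee_pr | nightclub_utils.py | enumerate_and_count
-- ===== SOURCE A (Python) =====
-- import math
-- from collections import Counter
--
-- def enumerate_and_count(lst):
--     if isinstance(lst, float) and math.isnan(lst):
--         return 'NaN'
--     # Enumerate the list and count occurrences
--     counted_elements = Counter(lst)
--
--     # Convert the Counter object to a list of tuples
--     result_list = list(counted_elements.items())
--     sorted_result = sorted(result_list, key=lambda x: x[0])
--     formatted_output = ', '.join(f'{element} ({count})' if count > 1 else f'{element}' for element, count in sorted_result)
--
--     return formatted_output
-- ===== SOURCE B (Python) =====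
-- import math
--
-- def enumerate_and_count(lst):
--     if isinstance(lst, float) and math.isnan(lst):
--         return 'NaN'
--     # Selection-style: repeatedly extract the minimum element and all its copies.
--     # No sort, no Counter: the output order comes from always taking the current minimum.
--     parts = []
--     remaining = list(lst)
--     while remaining:
--         m = min(remaining)
--         c = remaining.count(m)
--         parts.append(f'{m} ({c})' if c > 1 else f'{m}')
--         remaining = [x for x in remaining if x != m]
--     return ', '.join(parts)
-- ===== Notes on version B (the rewrite author's own statement) =====
-- stated objective: alternative
-- what changed: B replaces A's Counter hash table followed by sorting its items with a selection-style loop: repeatedly extract the minimum of the remaining list, count and remove all its copies, and emit the formatted piece; no sort and no hash table are used.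
import Mathlib
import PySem

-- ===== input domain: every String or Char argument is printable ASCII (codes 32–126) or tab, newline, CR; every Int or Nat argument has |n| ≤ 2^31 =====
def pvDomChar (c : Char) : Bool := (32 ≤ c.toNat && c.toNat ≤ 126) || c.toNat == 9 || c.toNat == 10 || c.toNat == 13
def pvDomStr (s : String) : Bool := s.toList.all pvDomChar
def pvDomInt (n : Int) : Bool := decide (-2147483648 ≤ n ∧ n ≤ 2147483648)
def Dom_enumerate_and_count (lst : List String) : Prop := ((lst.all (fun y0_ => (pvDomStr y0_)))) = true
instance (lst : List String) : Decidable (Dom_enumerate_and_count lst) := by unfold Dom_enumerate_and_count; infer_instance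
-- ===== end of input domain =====

-- B replaces A's Counter + sort-of-items with a selection-style loop that repeatedly
-- extracts the minimum of the remaining list with all its copies (alternative algorithm,
-- not claimed faster).

-- ===== PORT A =====
-- A's `isinstance(lst, float)` NaN guard can never fire for an argument of type List String,
-- so it has no counterpart here.
def enumerate_and_count (lst : List String) : String :=
  let counted_elements := PySem.Dict.counter lst
  let result_list := counted_elements.items
  let sorted_result := PySem.List.sorted result_list (fun x => x.1)
  PySem.Str.join ", " (sorted_result.map (fun ec =>
    if ec.2 > 1 then PySem.Str.join "" [ec.1, " (", PySem.Int.toStr ec.2, ")"] else ec.1))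

-- ===== PORT B =====
-- the while-loop: take min(remaining), count its copies, drop them, recurse on the rest
def extractRuns (s : List String) : List (String × Int) :=
  match h : PySem.List.min? s (fun x => x) with
  | none => []
  | some m =>
    (m, (s.count m : Int)) :: extractRuns (s.filter (fun x => !(x == m)))
termination_by s.length
decreasing_by
  have hm : m ∈ s := PySem.List.min?_mem h
  have hlt : (List.filter (fun (x : {x // x ∈ s}) => !((x : String) == m)) s.attach).length
      < s.attach.length :=
    List.length_filter_lt_length_iff_exists.mpr ⟨⟨m, hm⟩, List.mem_attach _ _, by simp⟩
  simpa [List.length_unattach, List.length_attach] using hlt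

def enumerate_and_count_alt (lst : List String) : String :=
  PySem.Str.join ", " ((extractRuns lst).map (fun ec =>
    if ec.2 > 1 then PySem.Str.join "" [ec.1, " (", PySem.Int.toStr ec.2, ")"] else ec.1))

-- ===== PRECONDITION & SPEC =====
def Spec_enumerate_and_count (lst : List String) (out : String) : Prop := out = enumerate_and_count_alt lst
instance (lst : List String) (out : String) : Decidable (Spec_enumerate_and_count lst out) := by unfold Spec_enumerate_and_count; infer_instance

-- ===== CLAIM (what is proved, stated in full; the proofs are below) =====
def Claim_equal_enumerate_and_count : Prop := ∀ (lst : List String), Dom_enumerate_and_count lst → Spec_enumerate_and_count lst (enumerate_and_count lst)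

-- ===== LEMMAS AND PROOFS =====

lemma extractRuns_eq_aux : ∀ (n : Nat) (s : List String), s.length ≤ n →
    extractRuns s =
      (PySem.List.sorted (PySem.Set.ofList s) (fun x => x)).map
        (fun k => (k, (s.count k : Int))) := by
  intro n
  induction n with
  | zero =>
    intro s hs
    have : s = [] := List.eq_nil_of_length_eq_zero (Nat.le_zero.mp hs)
    subst this; rw [extractRuns.eq_def]; rfl
  | succ n ih =>
    intro s hlen
    rw [extractRuns.eq_def]
    cases hmin : PySem.List.min? s (fun x => x) with
    | none =>
      have : s = [] := (PySem.List.min?_eq_none_iff _ _).mp hmin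
      subst this; rfl
    | some m =>
      simp only
      have hm_mem : m ∈ s := PySem.List.min?_mem hmin
      have hm_min : ∀ y ∈ s, m ≤ y := fun y hy => PySem.List.min?_isMin hmin y hy
      set rest := s.filter (fun x => !(x == m)) with hrest_def
      have hrest_mem : ∀ {y}, y ∈ rest → y ∈ s ∧ y ≠ m := by
        intro y hy
        have := List.mem_filter.mp hy
        exact ⟨this.1, by simpa using this.2⟩
      have hm_lt : ∀ y ∈ rest, m < y := by
        intro y hy
        rcases hrest_mem hy with ⟨hys, hne⟩
        exact lt_of_le_of_ne (hm_min y hys) (Ne.symm hne)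
      have hm_notin : m ∉ rest := fun h => lt_irrefl m (hm_lt m h)
      have hlen' : rest.length ≤ n := by
        have hfl : (s.filter (fun x => !(x == m))).length < s.length :=
          List.length_filter_lt_length_iff_exists.mpr ⟨m, hm_mem, by simp⟩
        rw [hrest_def]
        omega
      rw [ih rest hlen']
      -- the sorted distinct keys of s are m followed by those of rest
      have hsorted : PySem.List.sorted (PySem.Set.ofList s) (fun x => x) =
          m :: PySem.List.sorted (PySem.Set.ofList rest) (fun x => x) := by
        apply PySem.List.sorted_eq_of_perm_of_pairwise_lt
        · apply (List.perm_ext_iff_of_nodup _ (PySem.Set.nodup_ofList _)).mpr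
          · intro a
            simp only [List.mem_cons, PySem.List.mem_sorted, PySem.Set.mem_ofList]
            constructor
            · rintro (rfl | ha)
              · exact hm_mem
              · exact (hrest_mem ha).1
            · intro ha
              by_cases hae : a = m
              · exact Or.inl hae
              · exact Or.inr (List.mem_filter.mpr ⟨ha, by simpa using hae⟩)
          · exact List.nodup_cons.mpr
              ⟨fun h => hm_notin ((PySem.Set.mem_ofList rest m).mp ((PySem.List.mem_sorted _ _ _ _).mp h)), by
                have := PySem.List.sorted_perm (PySem.Set.ofList rest) (fun x : String => x) false
                exact this.nodup_iff.mpr (PySem.Set.nodup_ofList _)⟩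
        · apply List.pairwise_cons.mpr
          refine ⟨?_, PySem.List.sorted_ofList_pairwise_lt rest⟩
          intro y hy
          exact hm_lt y ((PySem.Set.mem_ofList rest y).mp ((PySem.List.mem_sorted _ _ _ _).mp hy))
      rw [hsorted]
      simp only [List.map_cons]
      congr 1
      apply List.map_congr_left
      intro k hk
      have hk' : k ∈ rest := (PySem.Set.mem_ofList rest k).mp ((PySem.List.mem_sorted _ _ _ _).mp hk)
      have hkne : k ≠ m := (hrest_mem hk').2
      have : rest.count k = s.count k := by
        rw [hrest_def, List.count_filter]
        · simp [hkne]
      rw [this]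

-- ===== VERDICT (by name: the statement is the Claim_ definition above) =====
theorem enumerate_and_count_spec : Claim_equal_enumerate_and_count := by
  intro lst _
  unfold Spec_enumerate_and_count enumerate_and_count enumerate_and_count_alt
  have hB := extractRuns_eq_aux lst.length lst le_rfl
  have hA : PySem.List.sorted (PySem.Dict.counter lst).items (fun x => x.1) =
      (PySem.List.sorted (PySem.Set.ofList lst) (fun x => x)).map
        (fun k => (k, (lst.count k : Int))) := by
    rw [PySem.Dict.items_counter]
    apply PySem.List.sorted_eq_of_perm_of_pairwise_lt
    · exact (PySem.List.sorted_perm _ _ false).map _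
    · exact (PySem.List.sorted_ofList_pairwise_lt lst).map _ (fun a b h => h)
  simp only [hA, hB]
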